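-- pv_equiv track=rewrite | github.com/AILAB-CEFET-RJ/nerdd | src/tools/build_llm_adjudication_input.py | _metadata_supports_entity
-- ===== SOURCE A (Python) =====
-- import unicodedata
--
-- def _collapse_spaces(text: str) -> str:
--     return " ".join(str(text).split())
--
-- def _strip_accents(text: str) -> str:
--     normalized = unicodedata.normalize("NFKD", text)
--     return "".join(char for char in normalized if not unicodedata.combining(char))
--
-- def normalize_entity_text(text: str) -> str:
--     text = _collapse_spaces(str(text).strip().lower())
--     text = _strip_accents(text)
--     return text.strip(" \t\r\n.,;:!?()[]{}\"'")
--
-- def _normalized_tokens(text: str) -> list[str]: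
--     normalized = normalize_entity_text(text)
--     if not normalized:
--         return []
--     return [token for token in normalized.split() if token]
--
-- def _tokens_are_subsequence(needle_tokens: list[str], haystack_tokens: list[str]) -> bool:
--     if not needle_tokens or len(needle_tokens) > len(haystack_tokens):
--         return False
--     window = len(needle_tokens)
--     for start in range(len(haystack_tokens) - window + 1):
--         if haystack_tokens[start : start + window] == needle_tokens:
--             return True
--     return False
--
-- def _metadata_supports_entity(entity_norm: str, metadata_terms: set[str]) -> bool:
--     entity_tokens = _normalized_tokens(entity_norm)
--     if not entity_tokens:
--         return False
--     for term in metadata_terms: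
--         term_tokens = _normalized_tokens(term)
--         if entity_norm == term:
--             return True
--         if _tokens_are_subsequence(entity_tokens, term_tokens):
--             return True
--         if _tokens_are_subsequence(term_tokens, entity_tokens):
--             return True
--     return False
-- ===== SOURCE B (Python) =====
-- import unicodedata
--
-- def _collapse_spaces(text: str) -> str:
--     return " ".join(str(text).split())
--
-- def _strip_accents(text: str) -> str:
--     normalized = unicodedata.normalize("NFKD", text)
--     return "".join(char for char in normalized if not unicodedata.combining(char))
--
-- def normalize_entity_text(text: str) -> str:
--     text = _collapse_spaces(str(text).strip().lower())
--     text = _strip_accents(text)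
--     return text.strip(" \t\r\n.,;:!?()[]{}\"'")
--
-- def _normalized_tokens(text: str) -> list[str]:
--     normalized = normalize_entity_text(text)
--     if not normalized:
--         return []
--     return [token for token in normalized.split() if token]
--
-- def _metadata_supports_entity(entity_norm: str, metadata_terms: set[str]) -> bool:
--     entity_tokens = _normalized_tokens(entity_norm)
--     if not entity_tokens:
--         return False
--     ent = " " + " ".join(entity_tokens) + " "
--     for term in metadata_terms:
--         if entity_norm == term:
--             return True
--         term_tokens = _normalized_tokens(term)
--         if not term_tokens:
--             continue
--         t = " " + " ".join(term_tokens) + " "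
--         if ent in t or t in ent:
--             return True
--     return False
-- ===== Notes on version B (the rewrite author's own statement) =====
-- stated objective: idiomatic
-- what changed: B replaces A's explicit index-sliding window comparison of token lists (_tokens_are_subsequence) by substring search on space-padded space-joined token strings: ent = ' '+' '.join(tokens)+' ' and 'ent in t or t in ent', skipping terms with no tokens.
import Mathlib
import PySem

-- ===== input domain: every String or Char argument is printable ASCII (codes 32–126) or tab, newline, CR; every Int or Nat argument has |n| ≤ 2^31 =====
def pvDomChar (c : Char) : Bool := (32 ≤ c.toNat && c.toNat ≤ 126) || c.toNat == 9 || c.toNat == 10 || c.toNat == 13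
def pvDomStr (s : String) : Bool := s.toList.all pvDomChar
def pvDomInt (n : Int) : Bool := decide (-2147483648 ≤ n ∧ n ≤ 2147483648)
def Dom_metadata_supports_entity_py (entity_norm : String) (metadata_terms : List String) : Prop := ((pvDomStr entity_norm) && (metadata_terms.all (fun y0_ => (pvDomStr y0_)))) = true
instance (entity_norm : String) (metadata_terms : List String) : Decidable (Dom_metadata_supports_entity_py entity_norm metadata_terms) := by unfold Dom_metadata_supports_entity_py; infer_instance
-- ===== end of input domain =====

-- B replaces A's index-sliding window comparison of token lists by substring search on
-- space-padded joined token strings (idiomatic; same cost).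

-- ===== shared normalization helpers (identical code in A and B) =====
def collapseSpacesPy (text : String) : String :=
  PySem.Str.join " " (PySem.Str.split₀ text)

-- exact on the ASCII input domain: NFKD is the identity there and no ASCII char is combining
def stripAccentsPy (text : String) : String := text

def normalizeEntityTextPy (text : String) : String :=
  PySem.Str.stripChars (stripAccentsPy (collapseSpacesPy (PySem.Str.lower (PySem.Str.strip text))))
    " \t\r\n.,;:!?()[]{}\"'"

def normalizedTokensPy (text : String) : List String :=
  let normalized := normalizeEntityTextPy text
  if normalized == "" then []
  else (PySem.Str.split₀ normalized).filter (fun token => token != "")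

-- ===== PORT A =====
def tokensAreSubsequencePy (needle hay : List String) : Bool :=
  if needle.isEmpty || decide (hay.length < needle.length) then false
  else
    let window := needle.length
    (PySem.List.pyRange 0 ((hay.length : Int) - (window : Int) + 1) 1).any
      (fun start => PySem.List.slice hay (some start) (some (start + (window : Int))) == needle)

def supportLoopA (entity_norm : String) (entity_tokens : List String) : List String → Bool
  | [] => false
  | term :: rest =>
    let term_tokens := normalizedTokensPy term
    if entity_norm == term then true
    else if tokensAreSubsequencePy entity_tokens term_tokens then true
    else if tokensAreSubsequencePy term_tokens entity_tokens then true
    else supportLoopA entity_norm entity_tokens rest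

def metadata_supports_entity_py (entity_norm : String) (metadata_terms : List String) : Bool :=
  let entity_tokens := normalizedTokensPy entity_norm
  if entity_tokens.isEmpty then false
  else supportLoopA entity_norm entity_tokens metadata_terms

-- ===== PORT B =====
def padTokensB (toks : List String) : String :=
  " " ++ PySem.Str.join " " toks ++ " "

def supportLoopB (entity_norm ent : String) : List String → Bool
  | [] => false
  | term :: rest =>
    if entity_norm == term then true
    else
      let term_tokens := normalizedTokensPy term
      if term_tokens.isEmpty then supportLoopB entity_norm ent rest
      else
        let t := padTokensB term_tokens
        if PySem.Str.isIn ent t || PySem.Str.isIn t ent then true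
        else supportLoopB entity_norm ent rest

def metadata_supports_entity_py_alt (entity_norm : String) (metadata_terms : List String) : Bool :=
  let entity_tokens := normalizedTokensPy entity_norm
  if entity_tokens.isEmpty then false
  else supportLoopB entity_norm (padTokensB entity_tokens) metadata_terms

-- ===== PRECONDITION & SPEC =====
def Spec_metadata_supports_entity_py (entity_norm : String) (metadata_terms : List String) (out : Bool) : Prop := out = metadata_supports_entity_py_alt entity_norm metadata_terms
instance (entity_norm : String) (metadata_terms : List String) (out : Bool) : Decidable (Spec_metadata_supports_entity_py entity_norm metadata_terms out) := by unfold Spec_metadata_supports_entity_py; infer_instance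

-- ===== CLAIM (what is proved, stated in full; the proofs are below) =====
def Claim_equal_metadata_supports_entity_py : Prop := ∀ (entity_norm : String) (metadata_terms : List String), Dom_metadata_supports_entity_py entity_norm metadata_terms → Spec_metadata_supports_entity_py entity_norm metadata_terms (metadata_supports_entity_py entity_norm metadata_terms)

-- ===== LEMMAS AND PROOFS =====

-- token-stream encoding used by the proofs: each token followed by one space
def pvQ : List (List Char) → List Char
  | [] => []
  | t :: ts => t ++ ' ' :: pvQ ts

-- a token is "good": nonempty and free of Python whitespace
def GoodTok (t : List Char) : Prop := t ≠ [] ∧ ∀ c ∈ t, PySem.Chars.isspace c = false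

lemma split₀_go_good (s : List Char) : ∀ (cur : List Char) (acc : List (List Char)),
    (∀ c ∈ cur, PySem.Chars.isspace c = false) →
    (∀ t ∈ acc, GoodTok t) →
    ∀ t ∈ PySem.Chars.split₀.go s cur acc, GoodTok t := by
  induction s with
  | nil =>
    intro cur acc hcur hacc t ht
    rw [PySem.Chars.split₀.go] at ht
    by_cases hc : cur.isEmpty
    · rw [if_pos hc] at ht
      exact hacc t (List.mem_reverse.mp ht)
    · rw [if_neg hc] at ht
      rw [List.mem_reverse] at ht
      rcases List.mem_cons.mp ht with h | h
      · subst h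
        refine ⟨by simpa [List.isEmpty_iff] using hc, ?_⟩
        intro c hcm
        exact hcur c (List.mem_reverse.mp hcm)
      · exact hacc t h
  | cons c rest ih =>
    intro cur acc hcur hacc t ht
    rw [PySem.Chars.split₀.go] at ht
    by_cases hsp : PySem.Chars.isspace c
    · rw [if_pos hsp] at ht
      by_cases hc : cur.isEmpty
      · rw [if_pos hc] at ht
        exact ih [] acc (by simp) hacc t ht
      · rw [if_neg hc] at ht
        refine ih [] (cur.reverse :: acc) (by simp) ?_ t ht
        intro u hu
        rcases List.mem_cons.mp hu with h | h
        · subst h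
          refine ⟨by simpa [List.isEmpty_iff] using hc, ?_⟩
          intro d hd
          exact hcur d (List.mem_reverse.mp hd)
        · exact hacc u h
    · rw [if_neg hsp] at ht
      refine ih (c :: cur) acc ?_ hacc t ht
      intro d hd
      rcases List.mem_cons.mp hd with h | h
      · subst h; simpa using hsp
      · exact hcur d h

lemma split₀_good (s : List Char) : ∀ t ∈ PySem.Chars.split₀ s, GoodTok t := by
  unfold PySem.Chars.split₀
  exact split₀_go_good s [] [] (by simp) (by simp)

lemma normalizedTokens_good (text : String) :
    ∀ tok ∈ normalizedTokensPy text, GoodTok tok.toList := by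
  intro tok htok
  unfold normalizedTokensPy at htok
  by_cases hn : (normalizeEntityTextPy text == "") = true
  · simp [hn] at htok
  · rw [if_neg hn] at htok
    have hmem := List.mem_of_mem_filter htok
    rw [PySem.Str.split₀.eq_1, List.mem_map] at hmem
    obtain ⟨t, htmem, rfl⟩ := hmem
    rw [String.toList_ofList]
    exact split₀_good _ t htmem

lemma good_no_space {t : List Char} (h : GoodTok t) : ' ' ∉ t := by
  intro hm
  have := h.2 ' ' hm
  simp [PySem.Chars.isspace] at this

lemma pvQ_append (a b : List (List Char)) : pvQ (a ++ b) = pvQ a ++ pvQ b := by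
  induction a with
  | nil => simp [pvQ]
  | cons t ts ih => simp [pvQ, ih]

lemma pvQ_concat_space (u : List (List Char)) (h : u ≠ []) : ∃ w, pvQ u = w ++ [' '] := by
  induction u with
  | nil => exact absurd rfl h
  | cons t ts ih =>
    rcases ts with _ | ⟨a, ts'⟩
    · exact ⟨t, by simp [pvQ]⟩
    · obtain ⟨w, hw⟩ := ih (by simp)
      refine ⟨t ++ ' ' :: w, ?_⟩
      simp only [pvQ] at hw ⊢
      rw [hw]
      simp

lemma tok_prefix (a : List Char) : ∀ (b r s : List Char), ' ' ∉ a → ' ' ∉ b →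
    (a ++ ' ' :: r <+: b ++ ' ' :: s) → a = b ∧ r <+: s := by
  induction a with
  | nil =>
    intro b r s _ hb hp
    rcases b with _ | ⟨c, b'⟩
    · simpa using hp
    · simp only [List.nil_append, List.cons_append, List.cons_prefix_cons] at hp
      exact absurd (hp.1 ▸ (List.mem_cons_self : c ∈ c :: b') : ' ' ∈ c :: b') hb
  | cons c a' ih =>
    intro b r s ha hb hp
    rcases b with _ | ⟨d, b'⟩
    · simp only [List.cons_append, List.nil_append, List.cons_prefix_cons] at hp
      exact absurd (hp.1 ▸ (List.mem_cons_self : c ∈ c :: a') : ' ' ∈ c :: a') ha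
    · simp only [List.cons_append, List.cons_prefix_cons] at hp
      obtain ⟨he, hrest⟩ := ih b' r s (fun hm => ha (List.mem_cons_of_mem _ hm))
        (fun hm => hb (List.mem_cons_of_mem _ hm)) hp.2
      exact ⟨by rw [hp.1, he], hrest⟩

lemma Q_prefix (xs : List (List Char)) : ∀ (ys : List (List Char)),
    (∀ t ∈ xs, ' ' ∉ t) → (∀ t ∈ ys, ' ' ∉ t) →
    (pvQ xs <+: pvQ ys ↔ xs <+: ys) := by
  induction xs with
  | nil => intro ys _ _; simp [pvQ]
  | cons x xs' ih =>
    intro ys hx hy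
    constructor
    · intro hp
      rcases ys with _ | ⟨y, ys'⟩
      · simp [pvQ] at hp
      · simp only [pvQ] at hp
        obtain ⟨he, hrest⟩ := tok_prefix x y (pvQ xs') (pvQ ys')
          (hx x List.mem_cons_self) (hy y List.mem_cons_self) hp
        have := (ih ys' (fun t ht => hx t (List.mem_cons_of_mem _ ht))
          (fun t ht => hy t (List.mem_cons_of_mem _ ht))).mp hrest
        rw [List.cons_prefix_cons]
        exact ⟨he, this⟩
    · rintro ⟨r, rfl⟩
      rw [pvQ_append]
      exact List.prefix_append _ _

lemma infix_skip_tok (t : List Char) : ∀ (l p : List Char), ' ' ∉ t →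
    ((' ' :: p) <:+: (t ++ l)) → (' ' :: p) <:+: l := by
  induction t with
  | nil => intro l p _ h; simpa using h
  | cons c t' ih =>
    intro l p ht h
    rw [List.cons_append, List.infix_cons_iff] at h
    rcases h with h | h
    · rw [List.cons_prefix_cons] at h
      exact absurd (h.1 ▸ (List.mem_cons_self : c ∈ c :: t') : ' ' ∈ c :: t') ht
    · exact ih l p (fun hm => ht (List.mem_cons_of_mem _ hm)) h

lemma pad_infix (xs : List (List Char)) (hx : ∀ t ∈ xs, GoodTok t) (hxne : xs ≠ []) :
    ∀ (ys : List (List Char)), (∀ t ∈ ys, ' ' ∉ t) →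
    (((' ' :: pvQ xs) <:+: (' ' :: pvQ ys)) ↔ xs <:+: ys) := by
  intro ys
  induction ys with
  | nil =>
    intro _
    constructor
    · intro h
      have hlen := h.length_le
      rcases xs with _ | ⟨x, xs'⟩
      · exact absurd rfl hxne
      · have hxg := hx x List.mem_cons_self
        rcases x with _ | ⟨c, x'⟩
        · exact absurd rfl hxg.1
        · simp [pvQ] at hlen
    · intro h
      rcases xs with _ | ⟨x, xs'⟩
      · exact absurd rfl hxne
      · exact absurd (List.eq_nil_of_infix_nil h) (by simp)
  | cons y ys' ih =>
    intro hy
    constructor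
    · intro h
      rw [List.infix_cons_iff] at h
      rcases h with h | h
      · rw [List.cons_prefix_cons] at h
        have := (Q_prefix xs (y :: ys') (fun t ht => good_no_space (hx t ht)) hy).mp h.2
        exact this.isInfix
      · simp only [pvQ] at h
        have h2 := infix_skip_tok y (' ' :: pvQ ys') (pvQ xs) (hy y List.mem_cons_self) h
        have := (ih (fun t ht => hy t (List.mem_cons_of_mem _ ht))).mp h2
        exact this.trans (List.suffix_cons y ys').isInfix
    · rintro ⟨u, v, huv⟩
      rcases u with _ | ⟨u0, u'⟩
      · simp only [List.nil_append] at huv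
        refine List.IsPrefix.isInfix ?_
        rw [← huv, pvQ_append, List.cons_prefix_cons]
        exact ⟨rfl, List.prefix_append _ _⟩
      · obtain ⟨w, hw⟩ := pvQ_concat_space (u0 :: u') (by simp)
        refine ⟨' ' :: w, pvQ v, ?_⟩
        rw [← huv, pvQ_append, pvQ_append, hw]
        simp

lemma toList_injective : Function.Injective String.toList := by
  intro a b h
  rw [← String.ofList_toList (s := a), h, String.ofList_toList]

lemma map_toList_infix_iff (xs ys : List String) :
    xs.map String.toList <:+: ys.map String.toList ↔ xs <:+: ys := by
  constructor
  · rintro ⟨u, v, huv⟩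
    have huv' : List.map String.toList ys = u ++ (List.map String.toList xs ++ v) := by
      rw [← huv, List.append_assoc]
    obtain ⟨u', rest, hys, hu, hrest⟩ := List.map_eq_append_iff.mp huv'
    obtain ⟨m, v', hrest2, hm, hv⟩ := List.map_eq_append_iff.mp hrest
    have hmx : m = xs := List.map_injective_iff.mpr toList_injective hm
    exact ⟨u', v', by rw [hys, hrest2, hmx, ← List.append_assoc]⟩
  · rintro ⟨u, v, huv⟩
    exact ⟨u.map String.toList, v.map String.toList, by rw [← huv]; simp⟩

lemma join_space_Q (ts : List (List Char)) (h : ts ≠ []) :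
    PySem.Chars.join [' '] ts ++ [' '] = pvQ ts := by
  induction ts with
  | nil => exact absurd rfl h
  | cons t ts' ih =>
    rcases ts' with _ | ⟨a, ts''⟩
    · simp [PySem.Chars.join, pvQ, List.intercalate]
    · have := ih (by simp)
      simp only [PySem.Chars.join] at this ⊢
      rw [show ([' '] : List Char).intercalate (t :: a :: ts'') = t ++ [' '] ++ ([' '] : List Char).intercalate (a :: ts'') by simp [List.intercalate, List.intersperse]]
      rw [pvQ, ← this]
      simp

lemma pad_toList (toks : List String) (h : toks ≠ []) :
    (padTokensB toks).toList = ' ' :: pvQ (toks.map String.toList) := by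
  have hmap : toks.map String.toList ≠ [] := by simpa using h
  unfold padTokensB PySem.Str.join
  rw [String.toList_append, String.toList_append, String.toList_ofList]
  rw [String.toList_ofList, List.append_assoc, join_space_Q _ hmap]
  rfl

lemma wcheck_iff (n h : List String) (hn : n ≠ []) :
    (tokensAreSubsequencePy n h = true ↔ n <:+: h) := by
  unfold tokensAreSubsequencePy
  have hne : n.isEmpty = false := by simpa [List.isEmpty_iff] using hn
  by_cases hlen : h.length < n.length
  · simp only [hne, hlen, decide_true, Bool.or_true, if_true, Bool.false_eq_true, false_iff]
    intro hinf
    exact absurd hinf.length_le (by omega)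
  · simp only [hne, hlen, decide_false, Bool.or_false, Bool.false_eq_true, if_false, List.any_eq_true]
    constructor
    · rintro ⟨s, hs, heq⟩
      rw [PySem.List.mem_pyRange_one] at hs
      obtain ⟨hs0, hsb⟩ := hs
      have hj : s = ((s.toNat : Nat) : Int) := by omega
      rw [hj, PySem.List.slice_natCast_add h s.toNat n.length] at heq
      have heq' := eq_of_beq heq
      calc n = (h.drop s.toNat).take n.length := heq'.symm
        _ <:+: h.drop s.toNat := (List.take_prefix _ _).isInfix
        _ <:+: h := (List.drop_suffix _ _).isInfix
    · rintro ⟨u, v, huv⟩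
      refine ⟨(u.length : Int), ?_, ?_⟩
      · rw [PySem.List.mem_pyRange_one]
        have : h.length = u.length + n.length + v.length := by rw [← huv]; simp; omega
        constructor
        · omega
        · omega
      · rw [PySem.List.slice_natCast_add h u.length n.length]
        rw [← huv, List.append_assoc, List.drop_left, List.take_left']
        · exact beq_self_eq_true n
        · rfl

lemma isIn_pad_iff (xs ys : List String) (hx : ∀ t ∈ xs, GoodTok t.toList)
    (hy : ∀ t ∈ ys, GoodTok t.toList) (hxne : xs ≠ []) (hyne : ys ≠ []) :
    (PySem.Str.isIn (padTokensB xs) (padTokensB ys) = true ↔ xs <:+: ys) := by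
  rw [PySem.Str.isIn_iff_infix, pad_toList xs hxne, pad_toList ys hyne]
  rw [pad_infix (xs.map String.toList)
    (by intro t ht; obtain ⟨u, hu, rfl⟩ := List.mem_map.mp ht; exact hx u hu)
    (by simpa using hxne) (ys.map String.toList)
    (by intro t ht; obtain ⟨u, hu, rfl⟩ := List.mem_map.mp ht; exact good_no_space (hy u hu))]
  exact map_toList_infix_iff xs ys

lemma wcheck_nil_right (n : List String) (hn : n ≠ []) :
    tokensAreSubsequencePy n [] = false := by
  have hcond : (n.isEmpty || decide (([] : List String).length < n.length)) = true := by
    rcases n with _ | ⟨a, n'⟩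
    · exact absurd rfl hn
    · simp
  rw [tokensAreSubsequencePy, if_pos hcond]

lemma wcheck_nil_left (h : List String) : tokensAreSubsequencePy [] h = false := by
  unfold tokensAreSubsequencePy
  simp

lemma loop_eq (en : String) (et : List String) (hgood : ∀ t ∈ et, GoodTok t.toList)
    (hne : et ≠ []) : ∀ (terms : List String),
    supportLoopA en et terms = supportLoopB en (padTokensB et) terms := by
  intro terms
  induction terms with
  | nil => rfl
  | cons term rest ih =>
    rw [supportLoopA, supportLoopB]
    by_cases heq : (en == term) = true
    · rw [if_pos heq, if_pos heq]
    · rw [if_neg heq, if_neg heq]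
      have httg : ∀ t ∈ normalizedTokensPy term, GoodTok t.toList := normalizedTokens_good term
      by_cases htt : (normalizedTokensPy term).isEmpty
      · have httnil : normalizedTokensPy term = [] := List.isEmpty_iff.mp htt
        rw [if_pos htt]
        rw [show tokensAreSubsequencePy et (normalizedTokensPy term) = false by
          rw [httnil]; exact wcheck_nil_right et hne]
        rw [show tokensAreSubsequencePy (normalizedTokensPy term) et = false by
          rw [httnil]; exact wcheck_nil_left et]
        simpa using ih
      · have httne : normalizedTokensPy term ≠ [] := by simpa [List.isEmpty_iff] using htt
        rw [if_neg htt]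
        have h1 : tokensAreSubsequencePy et (normalizedTokensPy term)
            = PySem.Str.isIn (padTokensB et) (padTokensB (normalizedTokensPy term)) := by
          rw [Bool.eq_iff_iff, wcheck_iff et _ hne, isIn_pad_iff et _ hgood httg hne httne]
        have h2 : tokensAreSubsequencePy (normalizedTokensPy term) et
            = PySem.Str.isIn (padTokensB (normalizedTokensPy term)) (padTokensB et) := by
          rw [Bool.eq_iff_iff, wcheck_iff _ et httne, isIn_pad_iff _ et httg hgood httne hne]
        rw [h1, h2, ih]
        cases hb1 : PySem.Str.isIn (padTokensB et) (padTokensB (normalizedTokensPy term)) <;>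
            cases hb2 : PySem.Str.isIn (padTokensB (normalizedTokensPy term)) (padTokensB et) <;>
          simp only [PySem.Str.isIn] at hb1 hb2 <;> simp [hb1, hb2]

-- ===== VERDICT (by name: the statement is the Claim_ definition above) =====
theorem metadata_supports_entity_py_spec : Claim_equal_metadata_supports_entity_py := by
  intro en terms _dom
  unfold Spec_metadata_supports_entity_py metadata_supports_entity_py metadata_supports_entity_py_alt
  by_cases hemp : (normalizedTokensPy en).isEmpty
  · simp [hemp]
  · simp only [hemp, if_neg, Bool.false_eq_true, not_false_eq_true]
    exact loop_eq en _ (normalizedTokens_good en) (by simpa [List.isEmpty_iff] using hemp) terms
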